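-- pv_equiv track=rewrite | github.com/pypi-data/pypi-mirror-368 | packages/latin-rectangles/latin_rectangles-0.1.2.tar.gz/latin_rectangles-0.1.2/src/latin_rectangles/rook_polynomials.py | get_rook_polynomial_for_cycle
-- ===== SOURCE A (Python) =====
-- import math
--
-- _ROOK_POLY_CACHE: dict[int, list[int]] = {}
--
-- def get_rook_polynomial_for_cycle(k: int) -> list[int]:
--     """
--     Calculates the rook polynomial for the forbidden board of a k-cycle.
--     The formula for the j-th coefficient is taken from the Menage problem:
--     r_j(k) = (2k / (2k - j)) * C(2k - j, j)
--     where C is the binomial coefficient "n-choose-k".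
--
--     Args:
--         k: The cycle length.
--
--     Returns:
--         List of coefficients for the rook polynomial.
--     """
--     if k in _ROOK_POLY_CACHE:
--         return _ROOK_POLY_CACHE[k]
--
--     # The rook polynomial has degree k, so it has k+1 coefficients.
--     coeffs = [0] * (k + 1)
--
--     # r_0 is always 1
--     coeffs[0] = 1
--
--     for j in range(1, k + 1):
--         # This handles the case j=2k, where the denominator would be zero.
--         # In that situation, the binomial coefficient C(0, 2k) is 0 anyway.
--         if (2 * k - j) < j:
--             # C(n, k) is 0 if k > n
--             coeffs[j] = 0
--             continue
--
--         numerator = 2 * k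
--         denominator = 2 * k - j
--
--         # We use integer division `//` as the result is always an integer.
--         # This keeps calculations exact and avoids floating point issues.
--         term1 = (numerator * math.comb(denominator, j)) // denominator
--         coeffs[j] = term1
--
--     _ROOK_POLY_CACHE[k] = coeffs
--     return coeffs
-- ===== SOURCE B (Python) =====
-- _ROOK_POLY_CACHE: dict[int, list[int]] = {}
--
--
-- def get_rook_polynomial_for_cycle(k: int) -> list[int]:
--     """Rook polynomial of the forbidden board of a k-cycle, built incrementally:
--     each coefficient is obtained from the previous one by the exact ratio
--     c_j / c_{j-1} = (2k-2j+1)(2k-2j+2) / (j(2k-j)), starting from c_0 = 1."""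
--     if k in _ROOK_POLY_CACHE:
--         return _ROOK_POLY_CACHE[k]
--
--     coeffs = [0] * (k + 1)
--     coeffs[0] = 1
--
--     c = 1
--     for j in range(1, k + 1):
--         c = c * (2 * k - 2 * j + 1) * (2 * k - 2 * j + 2) // (j * (2 * k - j))
--         coeffs[j] = c
--
--     _ROOK_POLY_CACHE[k] = coeffs
--     return coeffs
-- ===== Notes on version B (the rewrite author's own statement) =====
-- stated objective: faster
-- what changed: B builds the coefficient list incrementally via the exact multiplicative ratio c_j/c_{j-1} = (2k-2j+1)(2k-2j+2)/(j(2k-j)) starting from c_0 = 1 (a running product, no binomials), instead of A's independent math.comb closed form per coefficient.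
import Mathlib
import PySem

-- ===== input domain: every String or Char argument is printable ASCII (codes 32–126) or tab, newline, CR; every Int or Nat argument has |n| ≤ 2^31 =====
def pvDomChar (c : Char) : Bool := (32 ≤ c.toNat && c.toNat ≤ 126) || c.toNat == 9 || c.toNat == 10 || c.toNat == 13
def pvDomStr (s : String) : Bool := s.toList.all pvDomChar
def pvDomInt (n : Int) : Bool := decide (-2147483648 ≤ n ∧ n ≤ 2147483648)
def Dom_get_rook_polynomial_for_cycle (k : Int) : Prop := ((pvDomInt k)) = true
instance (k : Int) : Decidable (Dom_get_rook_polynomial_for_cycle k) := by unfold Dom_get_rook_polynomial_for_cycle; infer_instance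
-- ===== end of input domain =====

-- B builds the coefficient list incrementally by the exact ratio of consecutive
-- coefficients (a running product, no binomials), instead of A's independent
-- closed form math.comb per coefficient; objective: faster (constant factor).
-- (A's module cache is pure memoisation and is not modelled; return values are
-- identical on first and cached calls.)


-- ===== PORT A =====
-- math.comb(n, j) = Nat.choose n j; on every input admitted by Pre_ both arguments are ≥ 0,
-- where .toNat is exact.
def get_rook_polynomial_for_cycle (k : Int) : List Int :=
  let coeffs : List Int := List.replicate (k + 1).toNat 0
  let coeffs := PySem.List.pySetD coeffs 0 1          -- coeffs[0] = 1
  (PySem.List.pyRange 1 (k + 1) 1).foldl (fun coeffs j =>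
    if 2 * k - j < j then
      PySem.List.pySetD coeffs j 0
    else
      PySem.List.pySetD coeffs j
        (PySem.Int.floordiv (2 * k * ((Nat.choose (2 * k - j).toNat j.toNat : Nat) : Int))
          (2 * k - j))) coeffs

-- ===== PORT B =====
-- the loop state is the pair (coeffs, c): the list being filled and the running coefficient
def get_rook_polynomial_for_cycle_alt (k : Int) : List Int :=
  let coeffs : List Int := List.replicate (k + 1).toNat 0
  let coeffs := PySem.List.pySetD coeffs 0 1          -- coeffs[0] = 1
  ((PySem.List.pyRange 1 (k + 1) 1).foldl (fun (st : List Int × Int) j =>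
    let c := PySem.Int.floordiv (st.2 * (2 * k - 2 * j + 1) * (2 * k - 2 * j + 2))
      (j * (2 * k - j))
    (PySem.List.pySetD st.1 j c, c)) (coeffs, 1)).1

-- ===== PRECONDITION & SPEC =====
-- For k < 0 the Python A raises IndexError on `coeffs[0] = 1` (the list [0]*(k+1) is empty);
-- Pre_ excludes exactly those inputs. (B raises the same IndexError there.)
def Pre_get_rook_polynomial_for_cycle (k : Int) : Prop := 0 ≤ k
instance (k : Int) : Decidable (Pre_get_rook_polynomial_for_cycle k) := by
  unfold Pre_get_rook_polynomial_for_cycle; infer_instance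

def pvWitness_get_rook_polynomial_for_cycle : Int := 3

def Spec_get_rook_polynomial_for_cycle (k : Int) (out : List Int) : Prop :=
  out = get_rook_polynomial_for_cycle_alt k
instance (k : Int) (out : List Int) : Decidable (Spec_get_rook_polynomial_for_cycle k out) := by
  unfold Spec_get_rook_polynomial_for_cycle; infer_instance

-- ===== CLAIM (what is proved, stated in full; the proofs are below) =====
def Claim_equal_get_rook_polynomial_for_cycle : Prop :=
  ∀ (k : Int), Dom_get_rook_polynomial_for_cycle k → Pre_get_rook_polynomial_for_cycle k →
    Spec_get_rook_polynomial_for_cycle k (get_rook_polynomial_for_cycle k)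

-- ===== LEMMAS AND PROOFS =====

/-- The common closed form both loops produce: coefficient `J` of the rook polynomial,
`2K/(2K-J)·C(2K-J,J)`, written without division as `C(2K-J,J) + C(2K-J-1,J-1)`. -/
def cN (K J : Nat) : Nat :=
  if J = 0 then 1 else Nat.choose (2 * K - J) J + Nat.choose (2 * K - J - 1) (J - 1)

/-- abstract factorial computation behind `cN_factorial` (no Nat subtraction). -/
lemma cN_factorial_aux (M J' C1 C2 : Nat)
    (t1 : C1 * (J' + 1).factorial * M.factorial = (M + J' + 1).factorial)
    (t2 : C2 * J'.factorial * M.factorial = (M + J').factorial) :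
    (C1 + C2) * ((J' + 1).factorial * M.factorial)
      = (M + 2 * J' + 2) * (M + J').factorial := by
  have h : (M + J' + 1).factorial = (M + J' + 1) * (M + J').factorial :=
    Nat.factorial_succ (M + J')
  calc (C1 + C2) * ((J' + 1).factorial * M.factorial)
      = C1 * (J' + 1).factorial * M.factorial + (J' + 1) * (C2 * J'.factorial * M.factorial) := by
        rw [Nat.factorial_succ J']; ring
    _ = (M + J' + 1) * (M + J').factorial + (J' + 1) * (M + J').factorial := by
        rw [t1, t2, h]
    _ = (M + 2 * J' + 2) * (M + J').factorial := by ring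

/-- `cN K J · J!·(2K−2J)! = 2K·(2K−J−1)!` for `J ≤ K`, `1 ≤ K`. -/
lemma cN_factorial (K J : Nat) (hJ : J ≤ K) (hK : 1 ≤ K) :
    cN K J * (J.factorial * (2 * K - 2 * J).factorial)
      = 2 * K * (2 * K - J - 1).factorial := by
  by_cases hJ0 : J = 0
  · subst hJ0
    rw [show cN K 0 = 1 from by simp [cN]]
    simp only [Nat.factorial_zero, one_mul, Nat.mul_zero, Nat.sub_zero]
    conv_lhs => rw [show 2 * K = (2 * K - 1) + 1 by omega]
    rw [Nat.factorial_succ, show 2 * K - 1 + 1 = 2 * K by omega]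
  · obtain ⟨J', rfl⟩ : ∃ J'', J = J'' + 1 := ⟨J - 1, by omega⟩
    have t1 := Nat.choose_mul_factorial_mul_factorial
      (show J' + 1 ≤ 2 * K - (J' + 1) by omega)
    have t2 := Nat.choose_mul_factorial_mul_factorial
      (show J' ≤ 2 * K - (J' + 1) - 1 by omega)
    set M := 2 * K - 2 * (J' + 1) with hM
    have e1 : 2 * K - (J' + 1) = M + J' + 1 := by omega
    have e2 : 2 * K - (J' + 1) - 1 = M + J' := by omega
    have e3 : 2 * K = M + 2 * J' + 2 := by omega
    have hcn : cN K (J' + 1)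
        = Nat.choose (M + J' + 1) (J' + 1) + Nat.choose (M + J') J' := by
      simp only [cN, if_neg (by omega : ¬ J' + 1 = 0), Nat.add_sub_cancel]
      rw [e2, e1]
    rw [show 2 * K - (J' + 1) - (J' + 1) = M by omega, e1] at t1
    rw [show 2 * K - (J' + 1) - 1 - J' = M by omega, e2] at t2
    rw [hcn, e2]
    conv_rhs => rw [e3]
    exact cN_factorial_aux M J' _ _ t1 t2

/-- The exact multiplicative recurrence B uses, at the Nat level:
`c_{J-1}·(2K−2J+1)(2K−2J+2) = c_J·J·(2K−J)` for `1 ≤ J ≤ K`. -/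
lemma cN_recurrence (K J : Nat) (h1 : 1 ≤ J) (hJ : J ≤ K) :
    cN K (J - 1) * (2 * K - 2 * J + 1) * (2 * K - 2 * J + 2)
      = cN K J * (J * (2 * K - J)) := by
  have hP : 0 < (J - 1).factorial * (2 * K - 2 * J).factorial :=
    Nat.mul_pos (Nat.factorial_pos _) (Nat.factorial_pos _)
  apply Nat.eq_of_mul_eq_mul_right hP
  have f1 := cN_factorial K (J - 1) (by omega) (by omega)
  have f2 := cN_factorial K J hJ (by omega)
  have e1 : 2 * K - 2 * (J - 1) = (2 * K - 2 * J + 1) + 1 := by omega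
  have e2 : 2 * K - (J - 1) - 1 = 2 * K - J := by omega
  rw [e1, e2] at f1
  have eF : ((2 * K - 2 * J + 1) + 1).factorial
      = (2 * K - 2 * J + 2) * ((2 * K - 2 * J + 1) * (2 * K - 2 * J).factorial) := by
    rw [Nat.factorial_succ, Nat.factorial_succ]
  rw [eF] at f1
  have hf : (2 * K - J).factorial = (2 * K - J) * (2 * K - J - 1).factorial := by
    conv_lhs => rw [show 2 * K - J = (2 * K - J - 1) + 1 by omega]
    rw [Nat.factorial_succ]
    congr 1
    omega
  have hJf : J.factorial = J * (J - 1).factorial := by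
    conv_lhs => rw [show J = (J - 1) + 1 by omega]
    rw [Nat.factorial_succ]
    congr 1
    omega
  calc cN K (J - 1) * (2 * K - 2 * J + 1) * (2 * K - 2 * J + 2)
        * ((J - 1).factorial * (2 * K - 2 * J).factorial)
      = cN K (J - 1) * ((J - 1).factorial
          * ((2 * K - 2 * J + 2) * ((2 * K - 2 * J + 1) * (2 * K - 2 * J).factorial))) := by
        ring
    _ = 2 * K * (2 * K - J).factorial := f1
    _ = (2 * K - J) * (2 * K * (2 * K - J - 1).factorial) := by rw [hf]; ring
    _ = (2 * K - J) * (cN K J * (J.factorial * (2 * K - 2 * J).factorial)) := by rw [f2]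
    _ = cN K J * (J * (2 * K - J)) * ((J - 1).factorial * (2 * K - 2 * J).factorial) := by
        rw [hJf]; ring

/-- A's loop value at `j` is `cN`. -/
lemma aval_eq (k j : Int) (hk : 0 ≤ k) (h1 : 1 ≤ j) (h2 : j ≤ k) :
    PySem.Int.floordiv (2 * k * ((Nat.choose (2 * k - j).toNat j.toNat : Nat) : Int)) (2 * k - j)
      = ((cN k.toNat j.toNat : Nat) : Int) := by
  lift k to ℕ using hk with K
  lift j to ℕ using (by omega : (0 : Int) ≤ j) with J
  have hJ1 : 1 ≤ J := by omega
  have hJK : J ≤ K := by omega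
  rw [show ((2 : Int) * K - J).toNat = 2 * K - J by omega, Int.toNat_natCast, Int.toNat_natCast]
  have hn : (0 : Int) < 2 * K - J := by omega
  set n : Nat := 2 * K - J with hn'
  have hn1 : 1 ≤ n := by omega
  have hshift : J * Nat.choose n J = n * Nat.choose (n - 1) (J - 1) := by
    obtain ⟨n', hn2⟩ : ∃ m, n = m + 1 := ⟨n - 1, by omega⟩
    obtain ⟨j', hj2⟩ : ∃ m, J = m + 1 := ⟨J - 1, by omega⟩
    rw [hn2, hj2]
    simp only [Nat.add_sub_cancel]
    have := Nat.add_one_mul_choose_eq n' j'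
    simpa [Nat.add_comm, Nat.mul_comm] using this.symm
  have hsum : 2 * K * Nat.choose n J = n * (Nat.choose n J + Nat.choose (n - 1) (J - 1)) := by
    have h2K : 2 * K = n + J := by omega
    rw [h2K, Nat.add_mul, Nat.mul_add, hshift]
  have hcast : ((2 : Int) * K * ((Nat.choose n J : Nat) : Int))
      = (2 * (K : Int) - J) * ((Nat.choose n J + Nat.choose (n - 1) (J - 1) : Nat) : Int) := by
    have hnk : (2 : Int) * K - J = ((n : Nat) : Int) := by omega
    rw [hnk]
    exact_mod_cast congrArg (fun x : Nat => (x : Int)) hsum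
  rw [hcast, PySem.Int.floordiv_eq_ediv_of_pos hn, Int.mul_ediv_cancel_left _ (by omega)]
  simp only [cN, if_neg (by omega : ¬ J = 0)]
  rw [show 2 * K - J - 1 = n - 1 by omega, ← hn']

/-- B's loop step maps `cN (J-1)` to `cN J`. -/
lemma bstep_eq (k j : Int) (hk : 0 ≤ k) (h1 : 1 ≤ j) (h2 : j ≤ k) :
    PySem.Int.floordiv (((cN k.toNat (j.toNat - 1) : Nat) : Int) * (2 * k - 2 * j + 1)
        * (2 * k - 2 * j + 2)) (j * (2 * k - j))
      = ((cN k.toNat j.toNat : Nat) : Int) := by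
  lift k to ℕ using hk with K
  lift j to ℕ using (by omega : (0 : Int) ≤ j) with J
  rw [Int.toNat_natCast, Int.toNat_natCast]
  have hJ1 : 1 ≤ J := by omega
  have hJK : J ≤ K := by omega
  have hnum : ((cN K (J - 1) : Nat) : Int) * (2 * (K : Int) - 2 * J + 1) * (2 * (K : Int) - 2 * J + 2)
      = ((cN K (J - 1) * (2 * K - 2 * J + 1) * (2 * K - 2 * J + 2) : Nat) : Int) := by
    push_cast
    have e1 : (2 * (K : Int) - 2 * J + 1) = (((2 * K - 2 * J + 1 : Nat) : Nat) : Int) := by omega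
    have e2 : (2 * (K : Int) - 2 * J + 2) = (((2 * K - 2 * J + 2 : Nat) : Nat) : Int) := by omega
    rw [e1, e2]
    push_cast
    ring
  rw [hnum, cN_recurrence K J hJ1 hJK]
  have hd : (0 : Int) < (J : Int) * (2 * (K : Int) - J) := by
    have : (0 : Int) < (J : Int) := by omega
    have : (0 : Int) < 2 * (K : Int) - (J : Int) := by omega
    positivity
  have hdc : ((J : Int) * (2 * (K : Int) - J)) = ((J * (2 * K - J) : Nat) : Int) := by
    push_cast [Nat.cast_sub (by omega : J ≤ 2 * K)]
    ring
  rw [show ((cN K J * (J * (2 * K - J)) : Nat) : Int)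
        = ((J : Int) * (2 * (K : Int) - J)) * ((cN K J : Nat) : Int) by
      rw [hdc]; push_cast; ring,
    PySem.Int.floordiv_eq_ediv_of_pos hd, Int.mul_ediv_cancel_left _ (by omega)]

/-- the two loops, run over `range(1, t+1)`, produce the same list; B's running
coefficient is `cN t`. -/
lemma loop_eq (k : Int) (hk : 0 ≤ k) (init : List Int) (t : Nat) (ht : (t : Int) ≤ k) :
    (PySem.List.pyRange 1 ((t : Int) + 1) 1).foldl (fun (st : List Int × Int) j =>
        let c := PySem.Int.floordiv (st.2 * (2 * k - 2 * j + 1) * (2 * k - 2 * j + 2))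
          (j * (2 * k - j))
        (PySem.List.pySetD st.1 j c, c)) (init, 1)
      = ((PySem.List.pyRange 1 ((t : Int) + 1) 1).foldl (fun coeffs j =>
          if 2 * k - j < j then
            PySem.List.pySetD coeffs j 0
          else
            PySem.List.pySetD coeffs j
              (PySem.Int.floordiv (2 * k * ((Nat.choose (2 * k - j).toNat j.toNat : Nat) : Int))
                (2 * k - j))) init,
        ((cN k.toNat t : Nat) : Int)) := by
  induction t with
  | zero =>
    rw [show ((0 : Nat) : Int) + 1 = 1 by norm_num, PySem.List.pyRange_one_eq_nil le_rfl]
    simp [cN]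
  | succ t ih =>
    have ht' : (t : Int) ≤ k := by push_cast at ht ⊢; omega
    have hsplit : PySem.List.pyRange 1 (((t + 1 : Nat) : Int) + 1) 1
        = PySem.List.pyRange 1 ((t : Int) + 1) 1 ++ [(t : Int) + 1] := by
      push_cast
      exact PySem.List.pyRange_one_succ_right (by omega)
    have hj1 : (1 : Int) ≤ (t : Int) + 1 := by omega
    have hjk : (t : Int) + 1 ≤ k := by push_cast at ht; omega
    have hTo : ((t : Int) + 1).toNat = t + 1 := by omega
    have hb := bstep_eq k ((t : Int) + 1) hk hj1 hjk
    simp only [hTo, Nat.add_sub_cancel] at hb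
    have ha := aval_eq k ((t : Int) + 1) hk hj1 hjk
    rw [hsplit, List.foldl_append, List.foldl_append, ih ht']
    simp only [List.foldl_cons, List.foldl_nil]
    rw [if_neg (show ¬ 2 * k - ((t : Int) + 1) < (t : Int) + 1 by omega), hb, ha, hTo]

-- ===== VERDICT (by name: the statement is the Claim_ definition above) =====
theorem get_rook_polynomial_for_cycle_spec : Claim_equal_get_rook_polynomial_for_cycle := by
  intro k _ hk
  unfold Spec_get_rook_polynomial_for_cycle
  simp only [get_rook_polynomial_for_cycle, get_rook_polynomial_for_cycle_alt]
  have h := loop_eq k hk (PySem.List.pySetD (List.replicate (k + 1).toNat 0) 0 1) k.toNat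
    (by unfold Pre_get_rook_polynomial_for_cycle at hk; omega)
  rw [show ((k.toNat : Nat) : Int) + 1 = k + 1 from by
    unfold Pre_get_rook_polynomial_for_cycle at hk; omega] at h
  rw [h]
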